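-- pv_equiv track=rewrite | github.com/deeraw1/ecommerce-churn-web | api/predict-batch.py | normalize_keys
-- ===== SOURCE A (Python) =====
-- COLUMN_ALIASES = {
--     'tenure':           ['tenure', 'customer_tenure', 'months_active', 'subscription_length'],
--     'numberofaddress':  ['numberofaddress', 'address_count', 'num_addresses', 'shipping_addresses'],
--     'cashbackamount':   ['cashbackamount', 'cashback', 'reward_amount', 'cashback_earned'],
--     'daysincelastorder':['daysincelastorder', 'last_order_days', 'days_since_last', 'recency'],
--     'ordercount':       ['ordercount', 'total_orders', 'order_count', 'purchase_count'],
--     'satisfactionscore':['satisfactionscore', 'satisfaction', 'customer_score', 'rating'],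
-- }
--
-- def normalize_keys(row: dict) -> dict:
--     out = {}
--     for std, aliases in COLUMN_ALIASES.items():
--         for alias in aliases:
--             if alias in row:
--                 out[std] = row[alias]
--                 break
--         if std not in out:
--             for k, v in row.items():
--                 if k.strip().lower() == std:
--                     out[std] = v
--                     break
--     return out
-- ===== SOURCE B (Python) =====
-- COLUMN_ALIASES = {
--     'tenure':           ['tenure', 'customer_tenure', 'months_active', 'subscription_length'],
--     'numberofaddress':  ['numberofaddress', 'address_count', 'num_addresses', 'shipping_addresses'],
--     'cashbackamount':   ['cashbackamount', 'cashback', 'reward_amount', 'cashback_earned'],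
--     'daysincelastorder':['daysincelastorder', 'last_order_days', 'days_since_last', 'recency'],
--     'ordercount':       ['ordercount', 'total_orders', 'order_count', 'purchase_count'],
--     'satisfactionscore':['satisfactionscore', 'satisfaction', 'customer_score', 'rating'],
-- }
--
-- # reverse index: alias -> (standard name, priority of that alias in its list)
-- _ALIAS_RANK = {a: (std, j)
--                for std, aliases in COLUMN_ALIASES.items()
--                for j, a in enumerate(aliases)}
--
--
-- def normalize_keys(row: dict) -> dict:
--     # Single pass over the row: a rank tournament per standard name.
--     # An exact alias competes with its list position (0..3); a key whose
--     # stripped/lowered form equals a standard name competes with rank 4,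
--     # so it only wins when no exact alias occurs anywhere in the row.
--     # Lower rank wins; on equal rank the earlier row item is kept.
--     best = {}  # std -> (rank, value)
--     for k, v in row.items():
--         hit = _ALIAS_RANK.get(k)
--         if hit is not None:
--             std, j = hit
--             cur = best.get(std)
--             if cur is None or j < cur[0]:
--                 best[std] = (j, v)
--         nk = k.strip().lower()
--         if nk in COLUMN_ALIASES:
--             cur = best.get(nk)
--             if cur is None or 4 < cur[0]:
--                 best[nk] = (4, v)
--     return {std: best[std][1] for std in COLUMN_ALIASES if std in best}
-- ===== Notes on version B (the rewrite author's own statement) =====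
-- stated objective: faster
-- what changed: B inverts the traversal: instead of A's per-standard-name nested scans (alias list probes, then a whole-row rescan for the normalized fallback), B makes one pass over the row, scoring each key through a prebuilt reverse alias->(std, priority) index (exact alias = its list position 0-3, stripped/lowered std match = 4) and keeping the lowest-rank earliest candidate per std, then assembles the output in table order.
import Mathlib
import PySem

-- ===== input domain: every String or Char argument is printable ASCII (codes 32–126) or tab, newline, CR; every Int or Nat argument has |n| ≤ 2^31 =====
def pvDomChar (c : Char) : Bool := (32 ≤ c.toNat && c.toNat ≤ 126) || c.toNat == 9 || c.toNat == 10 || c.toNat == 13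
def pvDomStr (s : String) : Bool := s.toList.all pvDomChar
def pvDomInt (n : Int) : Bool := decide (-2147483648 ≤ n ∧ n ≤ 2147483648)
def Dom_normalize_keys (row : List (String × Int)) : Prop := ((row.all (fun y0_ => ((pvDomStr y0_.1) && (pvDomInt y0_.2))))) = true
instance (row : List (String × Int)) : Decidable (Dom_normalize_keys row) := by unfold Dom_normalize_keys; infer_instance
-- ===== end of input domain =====

-- B replaces A's per-std nested scans by one row pass ranked through a reverse alias index; return value only.

-- shared module constant COLUMN_ALIASES and helpers used by both ports:
-- dict-key lookup on the row (first match) and k.strip().lower()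
def pyColumnAliases : List (String × List String) := [
  ("tenure",            ["tenure", "customer_tenure", "months_active", "subscription_length"]),
  ("numberofaddress",   ["numberofaddress", "address_count", "num_addresses", "shipping_addresses"]),
  ("cashbackamount",    ["cashbackamount", "cashback", "reward_amount", "cashback_earned"]),
  ("daysincelastorder", ["daysincelastorder", "last_order_days", "days_since_last", "recency"]),
  ("ordercount",        ["ordercount", "total_orders", "order_count", "purchase_count"]),
  ("satisfactionscore", ["satisfactionscore", "satisfaction", "customer_score", "rating"])]

def rowGet? (row : List (String × Int)) (k : String) : Option Int :=
  (row.find? (fun kv => kv.1 == k)).map (·.2)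

def normKey (k : String) : String := PySem.Str.lower (PySem.Str.strip k)

-- ===== PORT A =====
-- inner 'for alias in aliases: if alias in row: out[std] = row[alias]; break'
def aAliasLoop (row : List (String × Int)) (out : PySem.Dict String Int) (std : String) :
    List String → PySem.Dict String Int
  | [] => out
  | a :: rest =>
    match rowGet? row a with
    | some v => out.insert std v
    | none => aAliasLoop row out std rest

-- inner 'for k, v in row.items(): if k.strip().lower() == std: out[std] = v; break'
def aFallbackLoop (out : PySem.Dict String Int) (std : String) :
    List (String × Int) → PySem.Dict String Int
  | [] => out
  | kv :: rest =>
    if normKey kv.1 == std then out.insert std kv.2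
    else aFallbackLoop out std rest

def aStep (row : List (String × Int)) (out : PySem.Dict String Int)
    (p : String × List String) : PySem.Dict String Int :=
  let out1 := aAliasLoop row out p.1 p.2
  if out1.contains p.1 then out1 else aFallbackLoop out1 p.1 row

def normalize_keys (row : List (String × Int)) : List (String × Int) :=
  (pyColumnAliases.foldl (aStep row) PySem.Dict.empty).items

-- ===== PORT B =====
-- module constant: _ALIAS_RANK = {a: (std, j) for std, aliases in COLUMN_ALIASES.items() for j, a in enumerate(aliases)}
def bAliasRank : PySem.Dict String (String × Int) :=
  pyColumnAliases.foldl
    (fun d p => (PySem.List.enumerate p.2).foldl (fun d ja => d.insert ja.2 (p.1, ja.1)) d)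
    PySem.Dict.empty

-- body of B's single 'for k, v in row.items():' loop: the rank tournament
def bStep (best : PySem.Dict String (Int × Int)) (kv : String × Int) :
    PySem.Dict String (Int × Int) :=
  let best1 :=
    match bAliasRank.get? kv.1 with
    | some sj =>
      match best.get? sj.1 with
      | none => best.insert sj.1 (sj.2, kv.2)
      | some c => if sj.2 < c.1 then best.insert sj.1 (sj.2, kv.2) else best
    | none => best
  let nk := normKey kv.1
  if (pyColumnAliases.map Prod.fst).contains nk then
    match best1.get? nk with
    | none => best1.insert nk (4, kv.2)
    | some c => if (4 : Int) < c.1 then best1.insert nk (4, kv.2) else best1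
  else best1

def normalize_keys_alt (row : List (String × Int)) : List (String × Int) :=
  let best := row.foldl bStep PySem.Dict.empty
  -- '{std: best[std][1] for std in COLUMN_ALIASES if std in best}'
  (pyColumnAliases.foldl
    (fun out p =>
      match best.get? p.1 with
      | some c => out.insert p.1 c.2
      | none => out)
    PySem.Dict.empty).items

-- ===== PRECONDITION & SPEC =====
def Spec_normalize_keys (row : List (String × Int)) (out : List (String × Int)) : Prop := out = normalize_keys_alt row
instance (row : List (String × Int)) (out : List (String × Int)) : Decidable (Spec_normalize_keys row out) := by unfold Spec_normalize_keys; infer_instance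

-- ===== CLAIM (what is proved, stated in full; the proofs are below) =====
def Claim_equal_normalize_keys : Prop := ∀ (row : List (String × Int)), Dom_normalize_keys row → Spec_normalize_keys row (normalize_keys row)

-- ===== LEMMAS AND PROOFS =====

-- the literal contents of the reverse index
def barItems : List (String × (String × Int)) := [("tenure", ("tenure", 0)), ("customer_tenure", ("tenure", 1)), ("months_active", ("tenure", 2)), ("subscription_length", ("tenure", 3)), ("numberofaddress", ("numberofaddress", 0)), ("address_count", ("numberofaddress", 1)), ("num_addresses", ("numberofaddress", 2)), ("shipping_addresses", ("numberofaddress", 3)), ("cashbackamount", ("cashbackamount", 0)), ("cashback", ("cashbackamount", 1)), ("reward_amount", ("cashbackamount", 2)), ("cashback_earned", ("cashbackamount", 3)), ("daysincelastorder", ("daysincelastorder", 0)), ("last_order_days", ("daysincelastorder", 1)), ("days_since_last", ("daysincelastorder", 2)), ("recency", ("daysincelastorder", 3)), ("ordercount", ("ordercount", 0)), ("total_orders", ("ordercount", 1)), ("order_count", ("ordercount", 2)), ("purchase_count", ("ordercount", 3)), ("satisfactionscore", ("satisfactionscore", 0)), ("satisfaction", ("satisfactionscore", 1)), ("customer_score",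 ("satisfactionscore", 2)), ("rating", ("satisfactionscore", 3))]

lemma bAliasRank_items : bAliasRank.items = barItems := by decide

-- fallback candidate rank of key k for standard name q
def fcand (q k : String) : Option Int :=
  if (pyColumnAliases.map Prod.fst).contains (normKey k) && (normKey k == q) then some 4 else none

-- combined candidate rank of key k for standard name q (alias hit beats fallback)
def cand (q k : String) : Option Int :=
  match bAliasRank.get? k with
  | some sj => if sj.1 = q then some sj.2 else fcand q k
  | none => fcand q k

-- one tournament round: replace s by (r, v) iff r beats s's rank strictly
def offer (s : Option (Int × Int)) (r : Option Int) (v : Int) : Option (Int × Int) :=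
  match r with
  | none => s
  | some j =>
    match s with
    | none => some (j, v)
    | some c => if j < c.1 then some (j, v) else s

-- left-biased min-rank merge
def mergeC (s t : Option (Int × Int)) : Option (Int × Int) :=
  match s, t with
  | none, t => t
  | some c, none => some c
  | some c, some d => if d.1 < c.1 then some d else some c

-- structural spec of B's fold at one key
def bestSpec (q : String) : List (String × Int) → Option (Int × Int)
  | [] => none
  | kv :: rest => mergeC (offer none (cand q kv.1) kv.2) (bestSpec q rest)

-- first-alias-order search (rank-carrying version of A's two loops)
def rankIn (k : String) : List String → Int → Option Int
  | [], _ => none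
  | a :: rest, j => if k = a then some j else rankIn k rest (j + 1)

def aliasWin (row : List (String × Int)) : List String → Int → Option (Int × Int)
  | [], _ => none
  | a :: rest, j =>
    match rowGet? row a with
    | some v => some (j, v)
    | none => aliasWin row rest (j + 1)

def wSpec (q : String) (al : List String) (row : List (String × Int)) : Option (Int × Int) :=
  match aliasWin row al 0 with
  | some p => some p
  | none => (row.find? (fun kv => normKey kv.1 == q)).map (fun kv => ((4 : Int), kv.2))

lemma bar_rank_lt (k : String) (sj : String × Int) (h : bAliasRank.get? k = some sj) :
    sj.2 < 4 := by
  have hm : (k, sj) ∈ bAliasRank.items := PySem.Dict.mem_items_of_get?_eq_some _ h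
  rw [bAliasRank_items] at hm
  have hall : ∀ p ∈ barItems, p.2.2 < 4 := by decide
  exact hall _ hm

lemma fcand_le (q k : String) (r : Int) (h : fcand q k = some r) : r ≤ 4 := by
  unfold fcand at h
  split_ifs at h
  all_goals (cases h; omega)

lemma cand_rank_le (q k : String) (r : Int) (h : cand q k = some r) : r ≤ 4 := by
  unfold cand at h
  rcases hb : bAliasRank.get? k with _ | sj <;> rw [hb] at h <;> simp only [] at h
  · exact fcand_le q k r h
  · by_cases h1 : sj.1 = q
    · rw [if_pos h1] at h; cases h; have := bar_rank_lt k sj hb; omega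
    · rw [if_neg h1] at h; exact fcand_le q k r h

lemma mergeC_none_right (s : Option (Int × Int)) : mergeC s none = s := by
  cases s <;> rfl

lemma offer_none_arg (s : Option (Int × Int)) (v : Int) : offer s none v = s := rfl

-- composing the alias offer with the fallback offer gives one offer with the combined candidate
lemma offer_offer (s : Option (Int × Int)) (a f : Option Int) (v : Int)
    (ha : ∀ j, a = some j → j < 4) (hf : ∀ j, f = some j → j = 4)
    (hs : ∀ c, s = some c → c.1 ≤ 4) :
    offer (offer s a v) f v = offer s (a.or f) v := by
  rcases a with _ | j
  · rfl
  · have hj := ha j rfl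
    rcases f with _ | i
    · rfl
    · have hi := hf i rfl
      rcases s with _ | c
      · simp only [offer, Option.some_or]
        rw [if_neg (by omega)]
      · have hc := hs c rfl
        simp only [offer, Option.some_or]
        split_ifs <;> (simp only [offer]; split_ifs <;> first | rfl | omega)

-- effect of the fallback branch of bStep on one key q
lemma fallback_get? (best1 : PySem.Dict String (Int × Int)) (kv : String × Int) (q : String)
    (h14 : ∀ c, best1.get? q = some c → c.1 ≤ 4) :
    (if (pyColumnAliases.map Prod.fst).contains (normKey kv.1) then
       match best1.get? (normKey kv.1) with
       | none => best1.insert (normKey kv.1) (4, kv.2)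
       | some c => if (4 : Int) < c.1 then best1.insert (normKey kv.1) (4, kv.2) else best1
     else best1).get? q = offer (best1.get? q) (fcand q kv.1) kv.2 := by
  unfold fcand
  rcases hc : (pyColumnAliases.map Prod.fst).contains (normKey kv.1) with _ | _
  · simp [offer]
  · by_cases hqk : normKey kv.1 = q
    · rcases hs : best1.get? q with _ | c
      · simp [hqk, hs, offer, PySem.Dict.get?_insert_self]
      · have hc4 := h14 c hs
        rw [hqk] at *
        simp only [if_true, hs]
        rw [if_neg (by omega)]
        simp only [offer, hs, beq_self_eq_true, Bool.and_true, if_pos]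
        rw [if_neg (by omega)]
    · have hne : q ≠ normKey kv.1 := fun h => hqk h.symm
      have hrhs : (normKey kv.1 == q) = false := by simpa using hqk
      rcases hs2 : best1.get? (normKey kv.1) with _ | c <;>
        simp only [hc, if_true, hs2, hrhs, Bool.and_false, if_neg, offer,
          PySem.Dict.get?_insert, Bool.false_eq_true, ite_false]
      · rw [if_neg hne]
      · split_ifs with h45
        · rw [PySem.Dict.get?_insert, if_neg hne]
        · rfl

-- B's per-item update at one fixed key q equals one 'offer' with the combined candidate,
-- provided stored ranks at q are ≤ 4 (maintained by the fold)
lemma bStep_get? (best : PySem.Dict String (Int × Int)) (kv : String × Int) (q : String)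
    (hq4 : ∀ c, best.get? q = some c → c.1 ≤ 4) :
    (bStep best kv).get? q = offer (best.get? q) (cand q kv.1) kv.2 := by
  unfold bStep
  rcases hb : bAliasRank.get? kv.1 with _ | sj
  · rw [fallback_get? best kv q hq4]
    unfold cand
    rw [hb]
  · have hj4 : sj.2 < 4 := bar_rank_lt _ _ hb
    have key : ∀ (b1 : PySem.Dict String (Int × Int)),
        b1.get? q = offer (best.get? q) (if sj.1 = q then some sj.2 else none) kv.2 →
        ((if (pyColumnAliases.map Prod.fst).contains (normKey kv.1) then
            match b1.get? (normKey kv.1) with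
            | none => b1.insert (normKey kv.1) (4, kv.2)
            | some c => if (4 : Int) < c.1 then b1.insert (normKey kv.1) (4, kv.2) else b1
          else b1).get? q) = offer (best.get? q) (cand q kv.1) kv.2 := by
      intro b1 hi
      have h14 : ∀ c, b1.get? q = some c → c.1 ≤ 4 := by
        intro c hcq
        rw [hi] at hcq
        by_cases h2 : sj.1 = q
        · rw [if_pos h2] at hcq
          rcases hs : best.get? q with _ | c0 <;> rw [hs] at hcq <;> simp only [offer] at hcq
          · cases hcq; omega
          · split_ifs at hcq
            · cases hcq; omega
            · cases hcq; exact hq4 _ hs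
        · rw [if_neg h2] at hcq
          exact hq4 c hcq
      rw [fallback_get? b1 kv q h14, hi, offer_offer _ _ _ _
          (by intro j hj
              by_cases h2 : sj.1 = q
              · rw [if_pos h2] at hj; cases hj; omega
              · rw [if_neg h2] at hj; cases hj)
          (by intro j hj; unfold fcand at hj; split_ifs at hj; all_goals (cases hj; rfl))
          hq4]
      have hcand : cand q kv.1 = if sj.1 = q then some sj.2 else fcand q kv.1 := by
        unfold cand
        rw [hb]
      rw [hcand]
      by_cases h2 : sj.1 = q
      · rw [if_pos h2, if_pos h2, Option.some_or]
      · rw [if_neg h2, if_neg h2, Option.none_or]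
    have hi1 : (match best.get? sj.1 with
        | none => best.insert sj.1 (sj.2, kv.2)
        | some c => if sj.2 < c.1 then best.insert sj.1 (sj.2, kv.2) else best :
          PySem.Dict String (Int × Int)).get? q
        = offer (best.get? q) (if sj.1 = q then some sj.2 else none) kv.2 := by
      rcases hs : best.get? sj.1 with _ | c
      · show (best.insert sj.1 (sj.2, kv.2)).get? q = _
        by_cases h1 : sj.1 = q
        · rw [if_pos h1, ← h1, hs]
          simp only [offer]
          exact PySem.Dict.get?_insert_self _ _ _
        · rw [if_neg h1, offer_none_arg, PySem.Dict.get?_insert,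
            if_neg (fun h => h1 h.symm)]
      · show (if sj.2 < c.1 then best.insert sj.1 (sj.2, kv.2) else best).get? q = _
        by_cases h1 : sj.1 = q
        · rw [if_pos h1, ← h1, hs]
          simp only [offer]
          split_ifs
          · exact PySem.Dict.get?_insert_self _ _ _
          · exact hs
        · rw [if_neg h1, offer_none_arg]
          split_ifs
          · rw [PySem.Dict.get?_insert, if_neg (fun h => h1 h.symm)]
          · rfl
    exact key _ hi1

-- ranks stay ≤ 4 through a bStep
lemma bStep_rank_le (best : PySem.Dict String (Int × Int)) (kv : String × Int) (q : String)
    (hq4 : ∀ c, best.get? q = some c → c.1 ≤ 4) :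
    ∀ c, (bStep best kv).get? q = some c → c.1 ≤ 4 := by
  intro c hc
  rw [bStep_get? best kv q hq4] at hc
  rcases hr : cand q kv.1 with _ | j <;> rw [hr] at hc <;> simp only [offer] at hc
  · exact hq4 c hc
  · have hj := cand_rank_le q kv.1 j hr
    rcases hs : best.get? q with _ | c0 <;> rw [hs] at hc <;> simp only [] at hc
    · cases hc; omega
    · split_ifs at hc
      · cases hc; omega
      · cases hc; exact hq4 _ hs

lemma mergeC_offer (s t : Option (Int × Int)) (r : Option Int) (v : Int) :
    mergeC (offer s r v) t = mergeC s (mergeC (offer none r v) t) := by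
  rcases s with _ | c <;> rcases r with _ | j <;> rcases t with _ | d <;>
    simp only [offer, mergeC] <;>
    (try split_ifs) <;> simp only [mergeC] <;> (try split_ifs) <;> first | rfl | omega

lemma foldl_offer_acc (q : String) (row : List (String × Int)) :
    ∀ s, row.foldl (fun s kv => offer s (cand q kv.1) kv.2) s = mergeC s (bestSpec q row) := by
  induction row with
  | nil => intro s; simp [bestSpec, mergeC_none_right]
  | cons kv rest ih =>
    intro s
    rw [List.foldl_cons, ih, bestSpec, mergeC_offer]

lemma fold_bStep_get? (row : List (String × Int)) (q : String) :
    ∀ (best : PySem.Dict String (Int × Int)),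
      (∀ c, best.get? q = some c → c.1 ≤ 4) →
      (row.foldl bStep best).get? q =
        row.foldl (fun s kv => offer s (cand q kv.1) kv.2) (best.get? q) := by
  induction row with
  | nil => intro best _; rfl
  | cons kv rest ih =>
    intro best h4
    rw [List.foldl_cons, List.foldl_cons, ih _ (bStep_rank_le best kv q h4),
        bStep_get? best kv q h4]

lemma fold_bStep_empty (row : List (String × Int)) (q : String) :
    (row.foldl bStep PySem.Dict.empty).get? q = bestSpec q row := by
  rw [fold_bStep_get? row q PySem.Dict.empty (by intro c h; simp at h),
      foldl_offer_acc]
  simp [mergeC]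

lemma rankIn_ge (k : String) (al : List String) :
    ∀ j r, rankIn k al j = some r → j ≤ r := by
  induction al with
  | nil => intro j r h; cases h
  | cons a rest ih =>
    intro j r h
    unfold rankIn at h
    split_ifs at h
    · cases h; omega
    · have := ih (j + 1) r h; omega

lemma rankIn_lt (k : String) (al : List String) :
    ∀ j r, rankIn k al j = some r → r < j + al.length := by
  induction al with
  | nil => intro j r h; cases h
  | cons a rest ih =>
    intro j r h
    unfold rankIn at h
    split_ifs at h
    · cases h; simp only [List.length_cons]; omega
    · have := ih (j + 1) r h; simp only [List.length_cons]; omega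

lemma aliasWin_ge (row : List (String × Int)) (al : List String) :
    ∀ j p, aliasWin row al j = some p → j ≤ p.1 := by
  induction al with
  | nil => intro j p h; cases h
  | cons a rest ih =>
    intro j p h
    unfold aliasWin at h
    rcases hg : rowGet? row a with _ | v <;> rw [hg] at h
    · have := ih (j + 1) p h; omega
    · cases h; simp
  
lemma aliasWin_lt (row : List (String × Int)) (al : List String) :
    ∀ j p, aliasWin row al j = some p → p.1 < j + al.length := by
  induction al with
  | nil => intro j p h; cases h
  | cons a rest ih =>
    intro j p h
    unfold aliasWin at h
    rcases hg : rowGet? row a with _ | v <;> rw [hg] at h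
    · have := ih (j + 1) p h; simp only [List.length_cons]; omega
    · cases h; simp only [List.length_cons]; omega

lemma aliasWin_nil (al : List String) : ∀ j, aliasWin [] al j = none := by
  induction al with
  | nil => intro j; rfl
  | cons a rest ih => intro j; unfold aliasWin; simp [rowGet?, ih]

lemma rowGet?_cons (kv : String × Int) (row : List (String × Int)) (a : String) :
    rowGet? (kv :: row) a = if kv.1 = a then some kv.2 else rowGet? row a := by
  unfold rowGet?
  rcases kv with ⟨k, v⟩
  by_cases h : k = a <;> simp [h]

lemma aliasWin_cons (kv : String × Int) (row : List (String × Int)) (al : List String) :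
    ∀ j, aliasWin (kv :: row) al j =
      mergeC ((rankIn kv.1 al j).map (fun r => (r, kv.2))) (aliasWin row al j) := by
  induction al with
  | nil => intro j; rfl
  | cons a rest ih =>
    intro j
    rcases hg : rowGet? row a with _ | v <;> by_cases hk : kv.1 = a
    · simp only [aliasWin, rankIn, rowGet?_cons, hg, hk, if_pos, Option.map_some]
      rcases hw : aliasWin row rest (j + 1) with _ | p
      · simp [mergeC]
      · have := aliasWin_ge row rest (j + 1) p hw
        simp only [mergeC]
        rw [if_neg (by omega)]
    · simp only [aliasWin, rankIn, rowGet?_cons, hg, hk, ite_false]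
      exact ih (j + 1)
    · simp only [aliasWin, rankIn, rowGet?_cons, hg, hk, if_pos, Option.map_some]
      simp only [mergeC]
      rw [if_neg (by omega)]
    · simp only [aliasWin, rankIn, rowGet?_cons, hg, hk, ite_false]
      rcases hr : rankIn kv.1 rest (j + 1) with _ | r
      · simp [mergeC]
      · have := rankIn_ge kv.1 rest (j + 1) r hr
        simp only [Option.map_some, mergeC]
        rw [if_pos (by omega)]

-- the combined candidate of a standard name q, for any key, is: its first-alias rank
-- if it is an alias of q, else rank 4 exactly when its normalized form is q
lemma fcand_eq_of_mem (q : String) (hq : q ∈ pyColumnAliases.map Prod.fst) (k : String) :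
    fcand q k = if normKey k == q then some (4 : Int) else none := by
  unfold fcand
  by_cases h : normKey k = q
  · have hc : (pyColumnAliases.map Prod.fst).contains q = true := by
      simpa [List.contains_iff_mem] using hq
    rw [h, hc]
    simp
  · have hbeq : (normKey k == q) = false := by simpa using h
    rw [hbeq]
    simp

lemma cand_eq (p : String × List String) (hp : p ∈ pyColumnAliases) (k : String) :
    cand p.1 k =
      match rankIn k p.2 0 with
      | some r => some r
      | none => if normKey k == p.1 then some (4 : Int) else none := by
  fin_cases hp
  all_goals (
    unfold cand
    rcases hb : bAliasRank.get? k with _ | sj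
    · rw [PySem.Dict.get?_eq_none_iff_not_mem_keys] at hb
      rw [show bAliasRank.keys = barItems.map Prod.fst from by decide] at hb
      simp only [barItems, List.map_cons, List.map_nil, List.mem_cons,
        List.not_mem_nil, or_false] at hb
      push Not at hb
      simp only [rankIn, hb, ite_false]
      exact fcand_eq_of_mem _ (by decide) k
    · have hm : (k, sj) ∈ barItems := by
        rw [← bAliasRank_items]
        exact PySem.Dict.mem_items_of_get?_eq_some _ hb
      simp only [barItems, List.mem_cons, List.not_mem_nil, or_false,
        Prod.mk.injEq] at hm
      rcases hm with ⟨rfl, rfl⟩ | ⟨rfl, rfl⟩ | ⟨rfl, rfl⟩ | ⟨rfl, rfl⟩ | ⟨rfl, rfl⟩ | ⟨rfl, rfl⟩ | ⟨rfl, rfl⟩ | ⟨rfl, rfl⟩ | ⟨rfl, rfl⟩ | ⟨rfl, rfl⟩ | ⟨rfl, rfl⟩ | ⟨rfl, rfl⟩ | ⟨rfl, rfl⟩ | ⟨rfl, rfl⟩ | ⟨rfl, rfl⟩ | ⟨rfl, rfl⟩ | ⟨rfl, rfl⟩ | ⟨rfl, rfl⟩ | ⟨rfl, rfl⟩ | ⟨rfl,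 rfl⟩ | ⟨rfl, rfl⟩ | ⟨rfl, rfl⟩ | ⟨rfl, rfl⟩ | ⟨rfl, rfl⟩ <;> decide)

lemma table_len (p : String × List String) (hp : p ∈ pyColumnAliases) : p.2.length = 4 := by
  fin_cases hp <;> rfl

lemma bestSpec_eq_wSpec (p : String × List String) (hp : p ∈ pyColumnAliases) :
    ∀ row, bestSpec p.1 row = wSpec p.1 p.2 row := by
  intro row
  induction row with
  | nil => simp [bestSpec, wSpec, aliasWin_nil]
  | cons kv rest ih =>
    have hlen := table_len p hp
    unfold bestSpec
    rw [ih, cand_eq p hp kv.1]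
    unfold wSpec
    rw [aliasWin_cons]
    rcases hR : rankIn kv.1 p.2 0 with _ | r
    · simp only [Option.map_none]
      by_cases hq : normKey kv.1 = p.1
      · rw [if_pos (by simp [hq])]
        simp only [offer]
        rw [List.find?_cons_of_pos (by simp [hq])]
        rcases hA : aliasWin rest p.2 0 with _ | pb
        · rcases hFf : rest.find? (fun kv => normKey kv.1 == p.1) with _ | kvf <;>
            rw [hFf] <;> simp [mergeC]
        · have hlt := aliasWin_lt rest p.2 0 pb hA
          rw [hlen] at hlt
          simp only [mergeC]
          rw [if_pos (by omega)]
      · rw [if_neg (by simp [hq]), offer_none_arg]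
        rw [List.find?_cons_of_neg (by simp [hq])]
        simp [mergeC]
    · have hr4 : r < 4 := by have := rankIn_lt kv.1 p.2 0 r hR; rw [hlen] at this; omega
      simp only [offer, Option.map_some]
      rcases hA : aliasWin rest p.2 0 with _ | pb
      · rcases hFf : rest.find? (fun kv => normKey kv.1 == p.1) with _ | kvf <;> rw [hFf]
        · rfl
        · simp only [Option.map_some, mergeC]
          rw [if_neg (by omega)]
      · simp only [mergeC]
        split_ifs <;> rfl

-- ===== A side =====

lemma aAliasLoop_eq (row : List (String × Int)) (out : PySem.Dict String Int) (std : String)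
    (al : List String) : ∀ j, aAliasLoop row out std al =
      match aliasWin row al j with
      | some c => out.insert std c.2
      | none => out := by
  induction al with
  | nil => intro j; rfl
  | cons a rest ih =>
    intro j
    unfold aAliasLoop aliasWin
    rcases hg : rowGet? row a with _ | v
    · exact ih (j + 1)
    · rfl

lemma aFallbackLoop_eq (out : PySem.Dict String Int) (std : String)
    (row : List (String × Int)) :
    aFallbackLoop out std row =
      match (row.find? (fun kv => normKey kv.1 == std)).map (·.2) with
      | some v => out.insert std v
      | none => out := by
  induction row with
  | nil => rfl
  | cons kv rest ih =>
    by_cases h : normKey kv.1 == std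
    · simp only [aFallbackLoop, List.find?_cons, h]
      simp
    · simp only [aFallbackLoop, List.find?_cons, h]
      simpa using ih

-- B's output-assembly step
def bFinal (best : PySem.Dict String (Int × Int)) (out : PySem.Dict String Int)
    (p : String × List String) : PySem.Dict String Int :=
  match best.get? p.1 with
  | some c => out.insert p.1 c.2
  | none => out

lemma aStep_eq (row : List (String × Int)) (out : PySem.Dict String Int)
    (p : String × List String) (hp : p ∈ pyColumnAliases)
    (hout : out.contains p.1 = false) :
    aStep row out p = bFinal (row.foldl bStep PySem.Dict.empty) out p := by
  unfold aStep bFinal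
  rw [fold_bStep_empty, bestSpec_eq_wSpec p hp, aAliasLoop_eq row out p.1 p.2 0]
  unfold wSpec
  rcases hA : aliasWin row p.2 0 with _ | c
  · rw [if_neg (by simp [hout]), aFallbackLoop_eq]
    rcases hF : row.find? (fun kv => normKey kv.1 == p.1) with _ | kvf <;> rw [hF] <;> rfl
  · simp [PySem.Dict.contains_insert_self]

lemma contains_bFinal (best : PySem.Dict String (Int × Int)) (out : PySem.Dict String Int)
    (p : String × List String) (q : String) (hq : q ≠ p.1) :
    (bFinal best out p).contains q = out.contains q := by
  unfold bFinal
  rcases best.get? p.1 with _ | c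
  · rfl
  · simp [PySem.Dict.contains_insert, hq]

lemma fold_eq (row : List (String × Int)) :
    ∀ (tbl : List (String × List String)) (out : PySem.Dict String Int),
      (∀ p ∈ tbl, p ∈ pyColumnAliases) →
      (tbl.map Prod.fst).Nodup →
      (∀ p ∈ tbl, out.contains p.1 = false) →
      tbl.foldl (aStep row) out = tbl.foldl (bFinal (row.foldl bStep PySem.Dict.empty)) out := by
  intro tbl
  induction tbl with
  | nil => intro out _ _ _; rfl
  | cons p rest ih =>
    intro out hmem hnd hout
    simp only [List.foldl_cons]
    rw [aStep_eq row out p (hmem p List.mem_cons_self) (hout p List.mem_cons_self)]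
    refine ih _ (fun q hq => hmem q (List.mem_cons_of_mem _ hq)) (by simpa using hnd.of_cons) ?_
    intro q hq
    have hqne : q.1 ≠ p.1 := by
      simp only [List.map_cons, List.nodup_cons] at hnd
      intro h
      exact hnd.1 (h ▸ List.mem_map_of_mem hq)
    rw [contains_bFinal _ _ p q.1 hqne]
    exact hout q (List.mem_cons_of_mem _ hq)

-- ===== VERDICT (by name: the statement is the Claim_ definition above) =====
theorem normalize_keys_spec : Claim_equal_normalize_keys := by
  intro row _
  unfold Spec_normalize_keys normalize_keys normalize_keys_alt
  rw [fold_eq row pyColumnAliases PySem.Dict.empty (fun p hp => hp) (by decide)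
      (fun p _ => by simp)]
  rfl
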